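-- pv_equiv track=rewrite | github.com/RISKA667/Garmea | utils/date_utils.py | infer_birth_year_from_events
-- ===== SOURCE A (Python) =====
-- from typing import Optional, List, Tuple
--
-- def infer_birth_year_from_events(events: List[Tuple[str, int]]) -> Optional[int]:
--     """Infère une année de naissance basée sur des événements"""
--     # events = [(type_event, year), ...]
--     # ex: [("mariage", 1650), ("premier_enfant", 1652)]
--
--     min_birth_year = None
--     max_birth_year = None
--
--     for event_type, year in events:
--         if event_type == "mariage":
--             # Âge au mariage: 16-40 ans typiquement
--             min_birth_year = max(min_birth_year or 0, year - 40)
--             max_birth_year = min(max_birth_year or 9999, year - 16)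
--         elif event_type == "premier_enfant":
--             # Âge au premier enfant: 18-45 ans
--             min_birth_year = max(min_birth_year or 0, year - 45)
--             max_birth_year = min(max_birth_year or 9999, year - 18)
--         elif event_type == "deces":
--             # Espérance de vie: 30-80 ans
--             min_birth_year = max(min_birth_year or 0, year - 80)
--             max_birth_year = min(max_birth_year or 9999, year - 30)
--
--     if min_birth_year and max_birth_year:
--         # Prendre le milieu de la fourchette
--         return (min_birth_year + max_birth_year) // 2
--
--     return None
-- ===== SOURCE B (Python) =====
-- from typing import Optional, List, Tuple
--
-- _SPANS = {"mariage": (40, 16), "premier_enfant": (45, 18), "deces": (80, 30)}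
--
-- def _interval(events):
--     """Recursively intersect the birth-year intervals implied by recognized events.
--
--     Returns None when no event is recognized, else (low, high) — the meet
--     (componentwise max/min) of the per-event intervals [year - a, year - b]."""
--     if not events:
--         return None
--     (t, y) = events[0]
--     rest = _interval(events[1:])
--     if t not in _SPANS:
--         return rest
--     a, b = _SPANS[t]
--     cur = (y - a, y - b)
--     if rest is None:
--         return cur
--     return (max(cur[0], rest[0]), min(cur[1], rest[1]))
--
-- def infer_birth_year_from_events(events: List[Tuple[str, int]]) -> Optional[int]:
--     """Interval view: meet all event intervals recursively, clamp to [0, 9999], take midpoint."""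
--     span = _interval(events)
--     if span is None:
--         return None
--     lo, hi = max(span[0], 0), min(span[1], 9999)
--     if lo and hi:
--         return (lo + hi) // 2
--     return None
-- ===== Notes on version B (the rewrite author's own statement) =====
-- stated objective: alternative
-- what changed: Replaces A's iterative loop over two Option-typed running bounds with `or 0`/`or 9999` coercions by a recursive interval computation: each recognized event yields an interval [year-a, year-b], the recursion intersects them (componentwise max/min), and the final interval is clamped to [0,9999] once before the midpoint test.
-- intended difference: On lists whose implied upper-bound candidates are all non-negative, that contain an event pinning the upper bound to exactly year 0 (('mariage',16), ('premier_enfant',18) or ('deces',30)) with a further recognized event after the last such, and whose lower bound is positive, A's 'max_birth_year or 9999' mistakes the computed bound 0 for 'no bound yet' and forgets all earlier upper bounds, returning a midpoint from the later events only (e.g. Some 28 on the witness); B keeps the true minimal upper bound 0 and returns None, which is what A's own final zero-check intends for a bound of 0. — e.g. on infer_birth_year_from_events([("mariage", 16), ("mariage", 56)]): A returns some 28, B returns none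
import Mathlib
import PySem

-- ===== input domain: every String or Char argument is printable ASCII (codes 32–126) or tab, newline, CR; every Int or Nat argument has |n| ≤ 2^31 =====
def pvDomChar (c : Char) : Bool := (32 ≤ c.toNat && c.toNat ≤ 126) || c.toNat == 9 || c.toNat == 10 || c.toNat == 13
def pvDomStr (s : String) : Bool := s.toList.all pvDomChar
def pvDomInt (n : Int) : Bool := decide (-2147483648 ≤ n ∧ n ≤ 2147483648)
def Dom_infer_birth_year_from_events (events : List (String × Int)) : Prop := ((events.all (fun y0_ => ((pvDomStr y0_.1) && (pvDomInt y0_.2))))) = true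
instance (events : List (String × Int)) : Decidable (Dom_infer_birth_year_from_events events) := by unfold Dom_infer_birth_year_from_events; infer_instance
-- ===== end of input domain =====

-- B replaces A's iterative loop over two Option accumulators (with `or 0`/`or 9999` coercions)
-- by a recursive interval intersection clamped once at the end; return value only.

-- ===== PORT A =====
-- `min_birth_year or 0`: None and 0 both coerce to 0
def pvOrZero (o : Option Int) : Int :=
  match o with
  | none => 0
  | some v => v

-- `max_birth_year or 9999`: None and 0 both coerce to 9999
def pvOrNines (o : Option Int) : Int :=
  match o with
  | none => 9999
  | some v => if v = 0 then 9999 else v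

def pvStepA (s : Option Int × Option Int) (e : String × Int) : Option Int × Option Int :=
  if e.1 = "mariage" then
    (some (max (pvOrZero s.1) (e.2 - 40)), some (min (pvOrNines s.2) (e.2 - 16)))
  else if e.1 = "premier_enfant" then
    (some (max (pvOrZero s.1) (e.2 - 45)), some (min (pvOrNines s.2) (e.2 - 18)))
  else if e.1 = "deces" then
    (some (max (pvOrZero s.1) (e.2 - 80)), some (min (pvOrNines s.2) (e.2 - 30)))
  else s

def infer_birth_year_from_events (events : List (String × Int)) : Option Int :=
  let s := events.foldl pvStepA (none, none)
  match s.1, s.2 with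
  | some mn, some mx =>
      -- `if min_birth_year and max_birth_year`: both non-None and non-zero
      if mn ≠ 0 ∧ mx ≠ 0 then some (PySem.Int.floordiv (mn + mx) 2) else none
  | _, _ => none

-- ===== PORT B =====
def pvSPANS : PySem.Dict String (Int × Int) :=
  PySem.Dict.mk [("mariage", (40, 16)), ("premier_enfant", (45, 18)), ("deces", (80, 30))]

-- `_interval`: recursive meet of the per-event intervals [year - a, year - b]
def pvInterval : List (String × Int) → Option (Int × Int)
  | [] => none
  | e :: t =>
    let rest := pvInterval t
    match PySem.Dict.get? pvSPANS e.1 with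
    | none => rest
    | some (a, b) =>
      match rest with
      | none => some (e.2 - a, e.2 - b)
      | some r => some (max (e.2 - a) r.1, min (e.2 - b) r.2)

def infer_birth_year_from_events_alt (events : List (String × Int)) : Option Int :=
  match pvInterval events with
  | none => none
  | some span =>
    -- lo, hi = max(span[0], 0), min(span[1], 9999); `if lo and hi`: both non-zero
    if max span.1 0 ≠ 0 ∧ min span.2 9999 ≠ 0 then
      some (PySem.Int.floordiv (max span.1 0 + min span.2 9999) 2)
    else none

-- ===== PRECONDITION & SPEC =====
-- pvZ: the events that pin the upper birth-year bound to exactly 0 (year = minimal age of the type)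
def pvZ : List (String × Int) := ["mariage", "premier_enfant", "deces"].zip [16, 18, 30]

-- On lists whose upper-bound candidates are all non-negative (every year at least the minimal age),
-- that contain an event whose upper candidate is exactly 0 (year = minimal age, a pvZ member) with
-- a further recognized event after the last such, and whose lower bound is positive (some year
-- above the maximal age 40/45/80), A's `max_birth_year or 9999` mistakes the computed bound 0 for
-- "no bound yet" and forgets all earlier upper bounds, returning a midpoint from the later events
-- only (some 28 on the witness); B keeps the true minimal upper bound 0 and returns none, as A's
-- own final zero-check intends.
def D_infer_birth_year_from_events (events : List (String × Int)) : Prop :=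
  (∀ e ∈ events, ∀ z ∈ pvZ, z.1 = e.1 → z.2 ≤ e.2) ∧
  (∃ e ∈ events, ∃ z ∈ pvZ.zip [40, 45, 80], z.1.1 = e.1 ∧ z.2 < e.2) ∧
  pvZ.any events.contains = true ∧
  ∃ e ∈ events.reverse.takeWhile (fun e => !pvZ.contains e), e.1 ∈ pvZ.map Prod.fst

instance (events : List (String × Int)) : Decidable (D_infer_birth_year_from_events events) := by
  unfold D_infer_birth_year_from_events; infer_instance

def Spec_infer_birth_year_from_events (events : List (String × Int)) (out : Option Int) : Prop :=
  ¬ D_infer_birth_year_from_events events → out = infer_birth_year_from_events_alt events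
instance (events : List (String × Int)) (out : Option Int) : Decidable (Spec_infer_birth_year_from_events events out) := by unfold Spec_infer_birth_year_from_events; infer_instance

def pvDiffWitness_infer_birth_year_from_events : (List (String × Int)) := [("mariage", 16), ("mariage", 56)]
def pvDiffWitnessOut_infer_birth_year_from_events : (Option Int) × (Option Int) := (some 28, none)

-- ===== CLAIM (what is proved, stated in full; the proofs are below) =====
def Claim_unchanged_infer_birth_year_from_events : Prop := ∀ (events : List (String × Int)), Dom_infer_birth_year_from_events events → Spec_infer_birth_year_from_events events (infer_birth_year_from_events events)
def Claim_changed_infer_birth_year_from_events : Prop := Dom_infer_birth_year_from_events (pvDiffWitness_infer_birth_year_from_events) ∧ D_infer_birth_year_from_events (pvDiffWitness_infer_birth_year_from_events) ∧ infer_birth_year_from_events (pvDiffWitness_infer_birth_year_from_events) = pvDiffWitnessOut_infer_birth_year_from_events.1 ∧ infer_birth_year_from_events_alt (pvDiffWitness_infer_birth_year_from_events) = pvDiffWitnessOut_infer_birth_year_from_events.2 ∧ pvDiffWitnessOut_infer_birth_year_from_events.1 ≠ pvDiffWitnessOut_infer_birth_year_from_events.2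
def Claim_exact_infer_birth_year_from_events : Prop := ∀ (events : List (String × Int)), Dom_infer_birth_year_from_events events → D_infer_birth_year_from_events events → infer_birth_year_from_events events ≠ infer_birth_year_from_events_alt events

-- ===== LEMMAS AND PROOFS =====

-- proof-side event predicates (expanded forms of the D_ conjuncts)
-- an event whose implied upper-bound candidate is exactly 0
def pvZeroB (e : String × Int) : Bool :=
  (e.1 == "mariage" && e.2 == 16) || (e.1 == "premier_enfant" && e.2 == 18) || (e.1 == "deces" && e.2 == 30)

def pvRecogB (e : String × Int) : Bool :=
  e.1 == "mariage" || e.1 == "premier_enfant" || e.1 == "deces"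

-- the implied upper-bound candidate is non-negative (trivially true for unrecognized events)
def pvUpperOkB (e : String × Int) : Bool :=
  if e.1 == "mariage" then 16 ≤ e.2
  else if e.1 == "premier_enfant" then 18 ≤ e.2
  else if e.1 == "deces" then 30 ≤ e.2
  else true

-- the implied lower-bound candidate is positive
def pvLowerPosB (e : String × Int) : Bool :=
  if e.1 == "mariage" then 40 < e.2
  else if e.1 == "premier_enfant" then 45 < e.2
  else if e.1 == "deces" then 80 < e.2
  else false


-- the lists of lower/upper bound candidates implied by the events
def pvLows (events : List (String × Int)) : List Int :=
  events.filterMap (fun e => (PySem.Dict.get? pvSPANS e.1).map (fun o => e.2 - o.1))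
def pvUps (events : List (String × Int)) : List Int :=
  events.filterMap (fun e => (PySem.Dict.get? pvSPANS e.1).map (fun o => e.2 - o.2))

-- A's upper-bound update as a function on Int (9999 stands for the fresh state)
def pvG (u c : Int) : Int := min (if u = 0 then 9999 else u) c

lemma pvLookup (t : String) :
    PySem.Dict.get? pvSPANS t
      = if t = "mariage" then some ((40 : Int), (16 : Int))
        else if t = "premier_enfant" then some (45, 18)
        else if t = "deces" then some (80, 30)
        else none := by
  by_cases h1 : t = "mariage"
  · subst h1; rfl
  · by_cases h2 : t = "premier_enfant"
    · subst h2; rfl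
    · by_cases h3 : t = "deces"
      · subst h3; rfl
      · have b1 : ("mariage" == t) = false := by simp [Ne.symm h1]
        have b2 : ("premier_enfant" == t) = false := by simp [Ne.symm h2]
        have b3 : ("deces" == t) = false := by simp [Ne.symm h3]
        simp only [pvSPANS, PySem.Dict.get?_mk_cons, b1, b2, b3, if_neg h1, if_neg h2, if_neg h3,
          Bool.false_eq_true, if_false]
        rfl

lemma pvUps_cons (e : String × Int) (t : List (String × Int)) :
    pvUps (e :: t)
      = if e.1 = "mariage" then (e.2 - 16) :: pvUps t
        else if e.1 = "premier_enfant" then (e.2 - 18) :: pvUps t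
        else if e.1 = "deces" then (e.2 - 30) :: pvUps t
        else pvUps t := by
  simp only [pvUps, List.filterMap_cons, pvLookup]
  split_ifs <;> simp

lemma pvLows_cons (e : String × Int) (t : List (String × Int)) :
    pvLows (e :: t)
      = if e.1 = "mariage" then (e.2 - 40) :: pvLows t
        else if e.1 = "premier_enfant" then (e.2 - 45) :: pvLows t
        else if e.1 = "deces" then (e.2 - 80) :: pvLows t
        else pvLows t := by
  simp only [pvLows, List.filterMap_cons, pvLookup]
  split_ifs <;> simp

lemma pvZ_eq : pvZ = [("mariage", 16), ("premier_enfant", 18), ("deces", 30)] := rfl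

lemma pvZL_eq : pvZ.zip ([40, 45, 80] : List Int)
    = [(("mariage", 16), 40), (("premier_enfant", 18), 45), (("deces", 30), 80)] := rfl

lemma pvEq1 (events : List (String × Int)) :
    (∀ e ∈ events, ∀ z ∈ pvZ, z.1 = e.1 → z.2 ≤ e.2) ↔ (∀ e ∈ events, pvUpperOkB e = true) := by
  refine forall₂_congr (fun e _ => ?_)
  rw [pvZ_eq]
  by_cases h1 : e.1 = "mariage"
  · simp [h1, pvUpperOkB]
  · by_cases h2 : e.1 = "premier_enfant"
    · simp [h1, h2, pvUpperOkB]
    · by_cases h3 : e.1 = "deces"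
      · simp [h1, h2, h3, pvUpperOkB]
      · simp [h1, h2, h3, pvUpperOkB, Ne.symm h1, Ne.symm h2, Ne.symm h3]

lemma pvEq2 (events : List (String × Int)) :
    (∃ e ∈ events, ∃ z ∈ pvZ.zip [40, 45, 80], z.1.1 = e.1 ∧ z.2 < e.2)
      ↔ (∃ e ∈ events, pvLowerPosB e = true) := by
  refine exists_congr (fun e => and_congr_right (fun _ => ?_))
  rw [pvZL_eq]
  by_cases h1 : e.1 = "mariage"
  · simp [h1, pvLowerPosB]
  · by_cases h2 : e.1 = "premier_enfant"
    · simp [h1, h2, pvLowerPosB]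
    · by_cases h3 : e.1 = "deces"
      · simp [h1, h2, h3, pvLowerPosB]
      · simp [h1, h2, h3, pvLowerPosB, Ne.symm h1, Ne.symm h2, Ne.symm h3]

lemma pvMemZ (e : String × Int) : e ∈ pvZ ↔ pvZeroB e = true := by
  rcases e with ⟨a, b⟩
  rw [pvZ_eq]
  simp [pvZeroB, Prod.ext_iff]
  tauto

lemma pvEq3 (events : List (String × Int)) :
    (pvZ.any events.contains = true) ↔ (∃ e ∈ events, pvZeroB e = true) := by
  rw [List.any_eq_true]
  constructor
  · rintro ⟨z, hz, hm⟩; exact ⟨z, by simpa using hm, (pvMemZ z).mp hz⟩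
  · rintro ⟨e, he, hz⟩; exact ⟨e, (pvMemZ e).mpr hz, by simpa using he⟩

lemma pvEq4 : (fun e : String × Int => !pvZ.contains e) = (fun e : String × Int => !pvZeroB e) := by
  funext e
  have h : pvZ.contains e = pvZeroB e := by
    cases hc : pvZ.contains e <;> cases hz : pvZeroB e <;> try rfl
    · exact absurd ((pvMemZ e).mpr hz) (by simpa using hc)
    · exact absurd ((pvMemZ e).mp (by simpa using hc)) (by simp [hz])
  rw [h]

lemma pvEq5 (e : String × Int) : e.1 ∈ pvZ.map Prod.fst ↔ pvRecogB e = true := by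
  rw [pvZ_eq]
  simp [pvRecogB]
  tauto

lemma pvFoldA_some (events : List (String × Int)) (a b : Int) :
    events.foldl pvStepA (some a, some b)
      = (some (List.foldl max a (pvLows events)), some (List.foldl pvG b (pvUps events))) := by
  induction events generalizing a b with
  | nil => simp [pvLows, pvUps]
  | cons e t ih =>
    rw [List.foldl_cons, pvLows_cons, pvUps_cons]
    by_cases h1 : e.1 = "mariage"
    · simp [pvStepA, h1, pvOrZero, pvOrNines, ih, pvG]
    · by_cases h2 : e.1 = "premier_enfant"
      · simp [pvStepA, h1, h2, pvOrZero, pvOrNines, ih, pvG]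
      · by_cases h3 : e.1 = "deces"
        · simp [pvStepA, h1, h2, h3, pvOrZero, pvOrNines, ih, pvG]
        · simp [pvStepA, h1, h2, h3, ih]

lemma pvFoldA_char (events : List (String × Int)) :
    events.foldl pvStepA (none, none)
      = if pvUps events = [] then (none, none)
        else (some (List.foldl max 0 (pvLows events)), some (List.foldl pvG 9999 (pvUps events))) := by
  induction events with
  | nil => simp [pvUps]
  | cons e t ih =>
    rw [List.foldl_cons, pvLows_cons, pvUps_cons]
    by_cases h1 : e.1 = "mariage"
    · simp [pvStepA, h1, pvOrZero, pvOrNines, pvFoldA_some, pvG]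
    · by_cases h2 : e.1 = "premier_enfant"
      · simp [pvStepA, h1, h2, pvOrZero, pvOrNines, pvFoldA_some, pvG]
      · by_cases h3 : e.1 = "deces"
        · simp [pvStepA, h1, h2, h3, pvOrZero, pvOrNines, pvFoldA_some, pvG]
        · simp [pvStepA, h1, h2, h3, ih]

lemma pvA_char (events : List (String × Int)) :
    infer_birth_year_from_events events
      = if pvUps events = [] then none
        else if List.foldl max 0 (pvLows events) ≠ 0 ∧ List.foldl pvG 9999 (pvUps events) ≠ 0
          then some (PySem.Int.floordiv (List.foldl max 0 (pvLows events) + List.foldl pvG 9999 (pvUps events)) 2)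
          else none := by
  unfold infer_birth_year_from_events
  rw [pvFoldA_char]
  split_ifs <;> simp_all

-- folding max/min commutes past the initial accumulator
lemma pvFoldl_max_comm (a b : Int) (xs : List Int) :
    List.foldl max (max a b) xs = max a (List.foldl max b xs) := by
  induction xs generalizing b with
  | nil => rfl
  | cons x t ih => rw [List.foldl_cons, List.foldl_cons, max_assoc, ih]

lemma pvFoldl_min_comm (a b : Int) (xs : List Int) :
    List.foldl min (min a b) xs = min a (List.foldl min b xs) := by
  induction xs generalizing b with
  | nil => rfl
  | cons x t ih => rw [List.foldl_cons, List.foldl_cons, min_assoc, ih]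

-- the recursive interval meet computes exactly the clamped extrema of the candidate lists
lemma pvInterval_char (events : List (String × Int)) :
    (pvInterval events = none ∧ pvLows events = [] ∧ pvUps events = []) ∨
    (∃ L H, pvInterval events = some (L, H) ∧
      max L 0 = List.foldl max 0 (pvLows events) ∧
      min H 9999 = List.foldl min 9999 (pvUps events) ∧ pvUps events ≠ []) := by
  induction events with
  | nil => exact Or.inl ⟨rfl, rfl, rfl⟩
  | cons e t ih =>
    rw [pvLows_cons, pvUps_cons]
    simp only [pvInterval, pvLookup]
    by_cases h1 : e.1 = "mariage"
    · rw [if_pos h1, if_pos h1, if_pos h1]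
      rcases ih with ⟨h0, hl, hu⟩ | ⟨L, H, h0, hL, hH, hne⟩
      · refine Or.inr ⟨e.2 - 40, e.2 - 16, by simp [h0], ?_, ?_, by simp⟩
        · rw [hl]; simp [max_comm]
        · rw [hu]; simp [min_comm]
      · refine Or.inr ⟨max (e.2 - 40) L, min (e.2 - 16) H, by simp [h0], ?_, ?_, by simp⟩
        · rw [List.foldl_cons, max_comm 0 (e.2 - 40), pvFoldl_max_comm, ← hL, max_assoc]
        · rw [List.foldl_cons, min_comm 9999 (e.2 - 16), pvFoldl_min_comm, ← hH, min_assoc]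
    · rw [if_neg h1, if_neg h1, if_neg h1]
      by_cases h2 : e.1 = "premier_enfant"
      · rw [if_pos h2, if_pos h2, if_pos h2]
        rcases ih with ⟨h0, hl, hu⟩ | ⟨L, H, h0, hL, hH, hne⟩
        · refine Or.inr ⟨e.2 - 45, e.2 - 18, by simp [h0], ?_, ?_, by simp⟩
          · rw [hl]; simp [max_comm]
          · rw [hu]; simp [min_comm]
        · refine Or.inr ⟨max (e.2 - 45) L, min (e.2 - 18) H, by simp [h0], ?_, ?_, by simp⟩
          · rw [List.foldl_cons, max_comm 0 (e.2 - 45), pvFoldl_max_comm, ← hL, max_assoc]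
          · rw [List.foldl_cons, min_comm 9999 (e.2 - 18), pvFoldl_min_comm, ← hH, min_assoc]
      · rw [if_neg h2, if_neg h2, if_neg h2]
        by_cases h3 : e.1 = "deces"
        · rw [if_pos h3, if_pos h3, if_pos h3]
          rcases ih with ⟨h0, hl, hu⟩ | ⟨L, H, h0, hL, hH, hne⟩
          · refine Or.inr ⟨e.2 - 80, e.2 - 30, by simp [h0], ?_, ?_, by simp⟩
            · rw [hl]; simp [max_comm]
            · rw [hu]; simp [min_comm]
          · refine Or.inr ⟨max (e.2 - 80) L, min (e.2 - 30) H, by simp [h0], ?_, ?_, by simp⟩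
            · rw [List.foldl_cons, max_comm 0 (e.2 - 80), pvFoldl_max_comm, ← hL, max_assoc]
            · rw [List.foldl_cons, min_comm 9999 (e.2 - 30), pvFoldl_min_comm, ← hH, min_assoc]
        · rw [if_neg h3, if_neg h3, if_neg h3]
          exact ih

lemma pvB_char (events : List (String × Int)) :
    infer_birth_year_from_events_alt events
      = if pvUps events = [] then none
        else if List.foldl max 0 (pvLows events) ≠ 0 ∧ List.foldl min 9999 (pvUps events) ≠ 0
          then some (PySem.Int.floordiv (List.foldl max 0 (pvLows events) + List.foldl min 9999 (pvUps events)) 2)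
          else none := by
  unfold infer_birth_year_from_events_alt
  rcases pvInterval_char events with ⟨h0, _, hu⟩ | ⟨L, H, h0, hL, hH, hne⟩
  · rw [h0, hu]; simp
  · rw [h0, if_neg hne, ← hL, ← hH]

-- ---- integer fold lemmas ----
lemma pvG_no0 (cs : List Int) (u : Int) (hu : u ≠ 0) (h : ∀ c ∈ cs, c ≠ 0) :
    List.foldl pvG u cs = List.foldl min u cs := by
  induction cs generalizing u with
  | nil => rfl
  | cons c t ih =>
    have hc := h c (by simp)
    have hstep : pvG u c = min u c := by simp [pvG, hu]
    have hne : min u c ≠ 0 := by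
      rcases min_cases u c with ⟨h1, _⟩ | ⟨h1, _⟩ <;> omega
    simp only [List.foldl_cons, hstep]
    exact ih (min u c) hne (fun c hc => h c (by simp [hc]))

lemma pvG_neglock (cs : List Int) (u : Int) (hu : u < 0) :
    List.foldl pvG u cs = List.foldl min u cs := by
  induction cs generalizing u with
  | nil => rfl
  | cons c t ih =>
    have hstep : pvG u c = min u c := by simp [pvG]; omega
    have : min u c < 0 := by rcases min_cases u c with ⟨h1, _⟩ | ⟨h1, _⟩ <;> omega
    simp only [List.foldl_cons, hstep]
    exact ih (min u c) this

lemma pvG_neg_inv (cs : List Int) (u v : Int) (hI : u = v ∨ (0 < u ∧ v = 0))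
    (h : ∃ c ∈ cs, c < 0) :
    List.foldl pvG u cs = List.foldl min v cs := by
  induction cs generalizing u v with
  | nil => rcases h with ⟨c, hc, _⟩; simp at hc
  | cons c t ih =>
    simp only [List.foldl_cons]
    by_cases hc : c < 0
    · -- after a negative element both accumulators coincide and stay negative
      have heq : pvG u c = min v c := by
        rcases hI with rfl | ⟨h1, rfl⟩ <;> simp [pvG] <;> split_ifs <;> omega
      have hneg : pvG u c < 0 := by
        rcases hI with rfl | ⟨h1, rfl⟩ <;> simp [pvG] <;> split_ifs <;> omega
      rw [heq, pvG_neglock t (min v c) (heq ▸ hneg)]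
    · have hmem : ∃ c ∈ t, c < 0 := by
        rcases h with ⟨x, hx, hxneg⟩
        rcases List.mem_cons.mp hx with rfl | hx
        · omega
        · exact ⟨x, hx, hxneg⟩
      apply ih
      · -- the invariant is preserved by a non-negative element
        rcases hI with rfl | ⟨h1, rfl⟩
        · by_cases hu : u = 0
          · subst hu
            by_cases hc0 : c = 0
            · left; simp [pvG, hc0]
            · right; constructor
              · simp [pvG]; omega
              · simp; omega
          · left; simp [pvG, hu]
        · by_cases hc0 : c = 0
          · left; simp [pvG, hc0]; omega
          · right; constructor
            · have : u ≠ 0 := by omega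
              simp [pvG, this]; omega
            · simp; omega
      · exact hmem

lemma pvG_nonneg (cs : List Int) (u : Int) (hu : 0 ≤ u) (h : ∀ c ∈ cs, 0 ≤ c) :
    0 ≤ List.foldl pvG u cs := by
  induction cs generalizing u with
  | nil => exact hu
  | cons c t ih =>
    have hc := h c (by simp)
    have : 0 ≤ pvG u c := by simp [pvG]; split_ifs <;> omega
    simp only [List.foldl_cons]
    exact ih (pvG u c) this (fun c hc => h c (by simp [hc]))

lemma pvMin_nonneg (cs : List Int) (u : Int) (hu : 0 ≤ u) (h : ∀ c ∈ cs, 0 ≤ c) :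
    0 ≤ List.foldl min u cs := by
  induction cs generalizing u with
  | nil => exact hu
  | cons c t ih =>
    have hc := h c (by simp)
    have : 0 ≤ min u c := by omega
    simp only [List.foldl_cons]
    exact ih (min u c) this (fun c hc => h c (by simp [hc]))

lemma pvG_pos (cs : List Int) (u : Int) (hu : 0 < u) (h : ∀ c ∈ cs, 0 < c) :
    0 < List.foldl pvG u cs := by
  induction cs generalizing u with
  | nil => exact hu
  | cons c t ih =>
    have hc := h c (by simp)
    have : 0 < pvG u c := by simp [pvG]; split_ifs <;> omega
    simp only [List.foldl_cons]
    exact ih (pvG u c) this (fun c hc => h c (by simp [hc]))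

lemma pvMin_le_mem (cs : List Int) (u c : Int) (h : c ∈ cs) : List.foldl min u cs ≤ c := by
  induction cs generalizing u with
  | nil => simp at h
  | cons x t ih =>
    simp only [List.foldl_cons]
    rcases List.mem_cons.mp h with rfl | h
    · have : ∀ (t : List Int) (a : Int), List.foldl min a t ≤ a := by
        intro t
        induction t with
        | nil => simp
        | cons y s ihs => intro a; exact le_trans (ihs (min a y)) (by omega)
      exact le_trans (this t (min u c)) (by omega)
    · exact ih (min u x) h

lemma pvMax_le (ls : List Int) (h : ∀ l ∈ ls, l ≤ 0) : List.foldl max 0 ls = 0 := by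
  induction ls with
  | nil => rfl
  | cons l t ih =>
    have hl := h l (by simp)
    have : max 0 l = 0 := by omega
    simp only [List.foldl_cons, this]
    exact ih (fun l hl => h l (by simp [hl]))

lemma pvMax_pos (ls : List Int) (l : Int) (hm : l ∈ ls) (hl : 0 < l) : 0 < List.foldl max 0 ls := by
  have key : ∀ (t : List Int) (a : Int), l ∈ t → l ≤ List.foldl max a t := by
    intro t
    induction t with
    | nil => intro a h; simp at h
    | cons x s ihs =>
      intro a h
      rcases List.mem_cons.mp h with rfl | h
      · have mono : ∀ (t : List Int) (a : Int), a ≤ List.foldl max a t := by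
          intro t
          induction t with
          | nil => simp
          | cons y s ihm => intro a; exact le_trans (by omega) (ihm (max a y))
        exact le_trans (by omega : l ≤ max a l) (mono s (max a l))
      · exact ihs (max a x) h
  exact lt_of_lt_of_le hl (key ls 0 hm)

-- ---- bridges between event-level predicates and candidate lists ----
lemma pvBridge_upperOk (events : List (String × Int)) :
    (∀ e ∈ events, pvUpperOkB e = true) ↔ (∀ c ∈ pvUps events, 0 ≤ c) := by
  induction events with
  | nil => simp [pvUps]
  | cons e t ih =>
    rw [pvUps_cons, List.forall_mem_cons]
    by_cases h1 : e.1 = "mariage"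
    · rw [if_pos h1, List.forall_mem_cons]
      exact and_congr (by simp [pvUpperOkB, h1]; try omega) ih
    · by_cases h2 : e.1 = "premier_enfant"
      · rw [if_neg h1, if_pos h2, List.forall_mem_cons]
        exact and_congr (by simp [pvUpperOkB, h1, h2]; try omega) ih
      · by_cases h3 : e.1 = "deces"
        · rw [if_neg h1, if_neg h2, if_pos h3, List.forall_mem_cons]
          exact and_congr (by simp [pvUpperOkB, h1, h2, h3]; try omega) ih
        · rw [if_neg h1, if_neg h2, if_neg h3]
          have hT : pvUpperOkB e = true := by simp [pvUpperOkB, h1, h2, h3]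
          exact ⟨fun h => ih.mp h.2, fun h => ⟨hT, ih.mpr h⟩⟩

lemma pvBridge_lowerPos (events : List (String × Int)) :
    (∃ e ∈ events, pvLowerPosB e = true) ↔ (∃ l ∈ pvLows events, 0 < l) := by
  induction events with
  | nil => simp [pvLows]
  | cons e t ih =>
    rw [pvLows_cons, List.exists_mem_cons_iff]
    by_cases h1 : e.1 = "mariage"
    · rw [if_pos h1, List.exists_mem_cons_iff]
      exact or_congr (by simp [pvLowerPosB, h1]; try omega) ih
    · by_cases h2 : e.1 = "premier_enfant"
      · rw [if_neg h1, if_pos h2, List.exists_mem_cons_iff]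
        exact or_congr (by simp [pvLowerPosB, h1, h2]; try omega) ih
      · by_cases h3 : e.1 = "deces"
        · rw [if_neg h1, if_neg h2, if_pos h3, List.exists_mem_cons_iff]
          exact or_congr (by simp [pvLowerPosB, h1, h2, h3]; try omega) ih
        · rw [if_neg h1, if_neg h2, if_neg h3]
          have hF : pvLowerPosB e = false := by simp [pvLowerPosB, h1, h2, h3]
          refine ⟨fun h => ?_, fun h => Or.inr (ih.mpr h)⟩
          rcases h with h | h
          · rw [hF] at h; cases h
          · exact ih.mp h

lemma pvBridge_zero (events : List (String × Int)) :
    (∃ e ∈ events, pvZeroB e = true) ↔ (0 : Int) ∈ pvUps events := by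
  induction events with
  | nil => simp [pvUps]
  | cons e t ih =>
    rw [pvUps_cons, List.exists_mem_cons_iff]
    by_cases h1 : e.1 = "mariage"
    · rw [if_pos h1, List.mem_cons]
      refine or_congr ?_ ih
      rcases e with ⟨a, b⟩; simp at h1; subst h1
      simp [pvZeroB]; omega
    · by_cases h2 : e.1 = "premier_enfant"
      · rw [if_neg h1, if_pos h2, List.mem_cons]
        refine or_congr ?_ ih
        rcases e with ⟨a, b⟩; simp at h2; subst h2
        simp [pvZeroB]; omega
      · by_cases h3 : e.1 = "deces"
        · rw [if_neg h1, if_neg h2, if_pos h3, List.mem_cons]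
          refine or_congr ?_ ih
          rcases e with ⟨a, b⟩; simp at h3; subst h3
          simp [pvZeroB]; omega
        · rw [if_neg h1, if_neg h2, if_neg h3]
          have : pvZeroB e = false := by
            rcases e with ⟨a, b⟩
            simp only [pvZeroB, Bool.or_eq_false_iff, Bool.and_eq_false_iff]
            simp at h1 h2 h3
            exact ⟨⟨by simp [h1], by simp [h2]⟩, by simp [h3]⟩
          refine ⟨fun h => ?_, fun h => Or.inr (ih.mpr h)⟩
          rcases h with h | h
          · rw [this] at h; cases h
          · exact ih.mp h

lemma pvUps_no_zero (events : List (String × Int)) (h : ∀ e ∈ events, pvZeroB e = false) :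
    ∀ c ∈ pvUps events, c ≠ 0 := by
  intro c hc hc0
  have : (∃ e ∈ events, pvZeroB e = true) := (pvBridge_zero events).mpr (hc0 ▸ hc)
  rcases this with ⟨e, he, hz⟩
  simp [h e he] at hz

lemma pvUps_not_recog (events : List (String × Int)) (h : ∀ e ∈ events, pvRecogB e = false) :
    pvUps events = [] := by
  induction events with
  | nil => rfl
  | cons e t ih =>
    have he := h e (by simp)
    have h1 : ¬ e.1 = "mariage" := by intro h1; simp [pvRecogB, h1] at he
    have h2 : ¬ e.1 = "premier_enfant" := by intro h2; simp [pvRecogB, h2] at he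
    have h3 : ¬ e.1 = "deces" := by intro h3; simp [pvRecogB, h3] at he
    rw [pvUps_cons, if_neg h1, if_neg h2, if_neg h3]
    exact ih (fun e he => h e (by simp [he]))

lemma pvUps_pos_of_no_zero (events : List (String × Int))
    (hok : ∀ e ∈ events, pvUpperOkB e = true) (hz : ∀ e ∈ events, pvZeroB e = false) :
    ∀ c ∈ pvUps events, 0 < c := by
  intro c hc
  have h1 := (pvBridge_upperOk events).mp hok c hc
  have h2 := pvUps_no_zero events hz c hc
  omega

lemma pvUps_ne_nil_of_recog (events : List (String × Int)) (e : String × Int)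
    (hm : e ∈ events) (hr : pvRecogB e = true) : pvUps events ≠ [] := by
  induction events with
  | nil => simp at hm
  | cons x t ih =>
    rw [pvUps_cons]
    rcases List.mem_cons.mp hm with rfl | hm
    · rcases Bool.or_eq_true _ _ |>.mp hr with h | h
      · rcases Bool.or_eq_true _ _ |>.mp h with h' | h'
        · simp [beq_iff_eq] at h'; simp [h']
        · simp [beq_iff_eq] at h'
          by_cases h1 : e.1 = "mariage" <;> simp [h1, h']
      · simp [beq_iff_eq] at h
        by_cases h1 : e.1 = "mariage"
        · simp [h1]
        · by_cases h2 : e.1 = "premier_enfant" <;> simp [h1, h2, h]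
    · have := ih hm
      split_ifs <;> simp_all

lemma pvDrop_head (l : List (String × Int)) (pfn : (String × Int) → Bool)
    (z : String × Int) (rest : List (String × Int)) (h : l.dropWhile pfn = z :: rest) :
    pfn z = false := by
  induction l with
  | nil => simp at h
  | cons x t ih =>
    rw [List.dropWhile_cons] at h
    split_ifs at h with hx
    · exact ih h
    · cases h; simpa using hx

-- decomposition of events at the last zero event
lemma pvDecomp (events : List (String × Int)) (hz : ∃ e ∈ events, pvZeroB e = true) :
    ∃ p z q, events = p ++ z :: q ∧ pvZeroB z = true ∧ (∀ e ∈ q, pvZeroB e = false) ∧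
      q.reverse = events.reverse.takeWhile (fun e => !pvZeroB e) := by
  have hne : events.reverse.dropWhile (fun e => !pvZeroB e) ≠ [] := by
    intro hnil
    rcases hz with ⟨e, he, hze⟩
    have := List.dropWhile_eq_nil_iff.mp hnil e (List.mem_reverse.mpr he)
    simp [hze] at this
  rcases hd : events.reverse.dropWhile (fun e => !pvZeroB e) with _ | ⟨z, rest⟩
  · exact absurd hd hne
  · refine ⟨rest.reverse, z, (events.reverse.takeWhile (fun e => !pvZeroB e)).reverse, ?_, ?_, ?_, by simp⟩
    · have hsplit : events.reverse
          = events.reverse.takeWhile (fun e => !pvZeroB e) ++ (z :: rest) := by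
        rw [← hd, List.takeWhile_append_dropWhile]
      calc events = events.reverse.reverse := by rw [List.reverse_reverse]
        _ = (events.reverse.takeWhile (fun e => !pvZeroB e) ++ (z :: rest)).reverse := by
              rw [← hsplit]
        _ = rest.reverse ++ z :: (events.reverse.takeWhile (fun e => !pvZeroB e)).reverse := by
              simp
    · have := pvDrop_head _ _ _ _ hd
      simpa using this
    · intro e he
      have hm : e ∈ events.reverse.takeWhile (fun e => !pvZeroB e) := List.mem_reverse.mp he
      have := List.mem_takeWhile_imp hm
      simpa using this

lemma pvZero_cons (z : String × Int) (q : List (String × Int)) (h : pvZeroB z = true) :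
    pvUps (z :: q) = 0 :: pvUps q := by
  simp only [pvZeroB, Bool.or_eq_true, Bool.and_eq_true, beq_iff_eq] at h
  rcases h with (⟨h1, h2⟩ | ⟨h1, h2⟩) | ⟨h1, h2⟩ <;>
    rw [pvUps_cons] <;> simp [h1, h2]

lemma pvUps_append (l1 l2 : List (String × Int)) : pvUps (l1 ++ l2) = pvUps l1 ++ pvUps l2 := by
  simp [pvUps, List.filterMap_append]

-- the key agreement computation outside D_
lemma pvMain (events : List (String × Int)) : Spec_infer_birth_year_from_events events (infer_birth_year_from_events events) := by
  intro hnD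
  rw [pvA_char, pvB_char]
  by_cases hnil : pvUps events = []
  · rw [if_pos hnil, if_pos hnil]
  · rw [if_neg hnil, if_neg hnil]
    by_cases hz : ∃ e ∈ events, pvZeroB e = true
    · by_cases hok : ∀ e ∈ events, pvUpperOkB e = true
      · have hups_nonneg : ∀ c ∈ pvUps events, 0 ≤ c := (pvBridge_upperOk events).mp hok
        have hmem0 : (0 : Int) ∈ pvUps events := (pvBridge_zero events).mp hz
        have hV : List.foldl min 9999 (pvUps events) = 0 :=
          le_antisymm (pvMin_le_mem _ _ _ hmem0) (pvMin_nonneg _ _ (by norm_num) hups_nonneg)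
        by_cases hlo : ∃ e ∈ events, pvLowerPosB e = true
        · by_cases haf : ∃ e ∈ events.reverse.takeWhile (fun e => !pvZeroB e), pvRecogB e = true
          · refine absurd ⟨(pvEq1 events).mpr hok, (pvEq2 events).mpr hlo, (pvEq3 events).mpr hz, ?_⟩ hnD
            rw [pvEq4]
            rcases haf with ⟨e, he, hre⟩
            exact ⟨e, he, (pvEq5 e).mpr hre⟩
          · rcases pvDecomp events hz with ⟨p, z, q, hsplit, hzz, hq0, hqr⟩
            have hqnil : pvUps q = [] := by
              apply pvUps_not_recog
              intro e he
              by_contra hre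
              exact haf ⟨e, hqr ▸ List.mem_reverse.mpr he, by simpa using hre⟩
            have hsplitU : pvUps events = pvUps p ++ [0] := by
              rw [hsplit, pvUps_append, pvZero_cons z q hzz, hqnil]
            have hU : List.foldl pvG 9999 (pvUps events) = 0 := by
              rw [hsplitU, List.foldl_append]
              have hx : 0 ≤ List.foldl pvG 9999 (pvUps p) :=
                pvG_nonneg _ _ (by norm_num)
                  (fun c hc => hups_nonneg c (by rw [hsplitU]; exact List.mem_append_left _ hc))
              simp only [List.foldl_cons, List.foldl_nil, pvG]
              split_ifs <;> omega
            rw [hU, hV]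
        · have hzero : List.foldl max 0 (pvLows events) = 0 := by
            apply pvMax_le
            intro l hl
            by_contra hgt
            push_neg at hgt
            exact hlo ((pvBridge_lowerPos events).mpr ⟨l, hl, by omega⟩)
          rw [hzero]
          simp
      · have : ∃ c ∈ pvUps events, c < 0 := by
          by_contra hc
          push_neg at hc
          exact hok ((pvBridge_upperOk events).mpr (fun c hcm => by have := hc c hcm; omega))
        rw [pvG_neg_inv _ _ _ (Or.inl rfl) this]
    · have hno : ∀ c ∈ pvUps events, c ≠ 0 := by
        apply pvUps_no_zero
        intro e he
        by_contra hb
        exact hz ⟨e, he, by simpa using hb⟩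
      rw [pvG_no0 _ _ (by norm_num) hno]

-- ===== VERDICT (by name: the statement is the Claim_ definition above) =====
theorem infer_birth_year_from_events_spec : Claim_unchanged_infer_birth_year_from_events := by
  intro events _
  exact pvMain events

theorem infer_birth_year_from_events_changed : Claim_changed_infer_birth_year_from_events := by
  unfold Claim_changed_infer_birth_year_from_events; decide

theorem infer_birth_year_from_events_tight : Claim_exact_infer_birth_year_from_events := by
  intro events _ hD
  obtain ⟨hok4, hlo4, hz4, haf4⟩ := hD
  have hok := (pvEq1 events).mp hok4
  have hlo := (pvEq2 events).mp hlo4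
  have hz := (pvEq3 events).mp hz4
  rw [pvEq4] at haf4
  rw [pvA_char, pvB_char]
  rcases haf4 with ⟨ea, hea, hra'⟩
  have hra := (pvEq5 ea).mp hra'
  have hea' : ea ∈ events := by
    have := (List.takeWhile_sublist (l := events.reverse) (fun e => !pvZeroB e)).subset hea
    exact List.mem_reverse.mp this
  have hnil : pvUps events ≠ [] := pvUps_ne_nil_of_recog events ea hea' hra
  rw [if_neg hnil, if_neg hnil]
  have hups_nonneg : ∀ c ∈ pvUps events, 0 ≤ c := (pvBridge_upperOk events).mp hok
  have hmem0 : (0 : Int) ∈ pvUps events := (pvBridge_zero events).mp hz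
  have hV : List.foldl min 9999 (pvUps events) = 0 :=
    le_antisymm (pvMin_le_mem _ _ _ hmem0) (pvMin_nonneg _ _ (by norm_num) hups_nonneg)
  rcases (pvBridge_lowerPos events).mp hlo with ⟨l, hl, hlp⟩
  have hLo : 0 < List.foldl max 0 (pvLows events) := pvMax_pos _ _ hl hlp
  rcases pvDecomp events hz with ⟨p, z, q, hsplit, hzz, hq0, hqr⟩
  have heq : ea ∈ q := List.mem_reverse.mp (hqr ▸ hea)
  have hsplitU : pvUps events = pvUps p ++ 0 :: pvUps q := by
    rw [hsplit, pvUps_append, pvZero_cons z q hzz]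
  have hqpos : ∀ c ∈ pvUps q, 0 < c :=
    pvUps_pos_of_no_zero q
      (fun e he => hok e (by rw [hsplit]; exact List.mem_append_right _ (List.mem_cons_of_mem _ he)))
      hq0
  have hqnil : pvUps q ≠ [] := pvUps_ne_nil_of_recog q ea heq hra
  have hU : 0 < List.foldl pvG 9999 (pvUps events) := by
    rw [hsplitU, List.foldl_append, List.foldl_cons]
    have hx : 0 ≤ List.foldl pvG 9999 (pvUps p) :=
      pvG_nonneg _ _ (by norm_num)
        (fun c hc => hups_nonneg c (by rw [hsplitU]; exact List.mem_append_left _ hc))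
    have h0 : pvG (List.foldl pvG 9999 (pvUps p)) 0 = 0 := by
      simp only [pvG]; split_ifs <;> omega
    rw [h0]
    rcases hqe : pvUps q with _ | ⟨c, rest⟩
    · exact absurd hqe hqnil
    · rw [List.foldl_cons]
      have hc : 0 < c := hqpos c (by rw [hqe]; simp)
      have : 0 < pvG 0 c := by simp only [pvG]; split_ifs <;> omega
      exact pvG_pos rest _ this (fun x hx => hqpos x (by rw [hqe]; simp [hx]))
  rw [hV]
  rw [if_pos ⟨by omega, by omega⟩, if_neg (by simp)]
  simp
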